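-- pv_equiv track=rewrite | github.com/Carson-Reed12/advent-of-code-2024 | Day22/day22.py | valid_sequence
-- ===== SOURCE A (Python) =====
-- def valid_sequence(sequence):
--     for i in range(len(sequence) - 1):
--         if sequence[i] + sequence[i+1] >= 10 or sequence[i] + sequence[i+1] <= -10:
--             return False
--     for i in range(len(sequence) - 2):
--         if sequence[i] + sequence[i+1] + sequence[i+2] >= 10 or sequence[i] + sequence[i+1] + sequence[i+2] <= -10:
--             return False
--     if sequence[0] + sequence[1] + sequence[2] + sequence[3] >= 10 or sequence[0] + sequence[1] + sequence[2] + sequence[3] <= -10: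
--         return False
--     return True
-- ===== SOURCE B (Python) =====
-- def valid_sequence(sequence):
--     prefix = [0]
--     total = 0
--     for x in sequence:
--         total += x
--         prefix.append(total)
--     n = len(sequence)
--     if any(abs(prefix[i + 2] - prefix[i]) >= 10 for i in range(n - 1)):
--         return False
--     if any(abs(prefix[i + 3] - prefix[i]) >= 10 for i in range(n - 2)):
--         return False
--     return abs(sequence[0] + sequence[1] + sequence[2] + sequence[3]) < 10
-- ===== Notes on version B (the rewrite author's own statement) =====
-- stated objective: alternative
-- what changed: Replaces repeated overlapping window re-summation with a prefix-sum table built in one pass; each size-2/3 window sum becomes one subtraction of two table entries, and the checks become abs-difference scans instead of branch chains.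
import Mathlib
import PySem

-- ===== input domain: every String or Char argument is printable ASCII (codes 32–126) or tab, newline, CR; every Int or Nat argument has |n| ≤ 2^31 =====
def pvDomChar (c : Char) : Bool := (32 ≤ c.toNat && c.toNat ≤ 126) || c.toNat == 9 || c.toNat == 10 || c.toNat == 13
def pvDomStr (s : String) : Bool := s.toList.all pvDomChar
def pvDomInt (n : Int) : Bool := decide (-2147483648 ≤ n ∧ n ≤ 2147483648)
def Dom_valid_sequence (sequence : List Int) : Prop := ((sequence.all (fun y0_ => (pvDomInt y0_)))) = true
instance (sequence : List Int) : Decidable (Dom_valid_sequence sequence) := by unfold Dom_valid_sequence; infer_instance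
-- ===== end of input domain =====

-- B replaces A's repeated overlapping window re-summation by a one-pass prefix-sum
-- table; window sums become differences of two table entries (alternative, same cost).
-- ===== PORT A =====
def valid_sequence (sequence : List Int) : Bool :=
  let n : Int := sequence.length
  if (PySem.List.pyRange 0 (n - 1) 1).any (fun i =>
       decide (10 ≤ PySem.List.pyGetD sequence i 0 + PySem.List.pyGetD sequence (i+1) 0) ||
       decide (PySem.List.pyGetD sequence i 0 + PySem.List.pyGetD sequence (i+1) 0 ≤ -10)) then
    false
  else if (PySem.List.pyRange 0 (n - 2) 1).any (fun i =>
       decide (10 ≤ PySem.List.pyGetD sequence i 0 + PySem.List.pyGetD sequence (i+1) 0 + PySem.List.pyGetD sequence (i+2) 0) ||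
       decide (PySem.List.pyGetD sequence i 0 + PySem.List.pyGetD sequence (i+1) 0 + PySem.List.pyGetD sequence (i+2) 0 ≤ -10)) then
    false
  else if (decide (10 ≤ PySem.List.pyGetD sequence 0 0 + PySem.List.pyGetD sequence 1 0 + PySem.List.pyGetD sequence 2 0 + PySem.List.pyGetD sequence 3 0) ||
           decide (PySem.List.pyGetD sequence 0 0 + PySem.List.pyGetD sequence 1 0 + PySem.List.pyGetD sequence 2 0 + PySem.List.pyGetD sequence 3 0 ≤ -10)) then
    false
  else
    true

-- ===== PORT B =====
-- running-total prefix list: pvPrefix t xs = [t+xs[0], t+xs[0]+xs[1], …]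
def pvPrefix (t : Int) : List Int → List Int
  | [] => []
  | x :: xs => (t + x) :: pvPrefix (t + x) xs

def valid_sequence_alt (sequence : List Int) : Bool :=
  let prefix_ : List Int := 0 :: pvPrefix 0 sequence
  let n : Int := sequence.length
  if (PySem.List.pyRange 0 (n - 1) 1).any (fun i =>
       decide (10 ≤ |PySem.List.pyGetD prefix_ (i+2) 0 - PySem.List.pyGetD prefix_ i 0|)) then
    false
  else if (PySem.List.pyRange 0 (n - 2) 1).any (fun i =>
       decide (10 ≤ |PySem.List.pyGetD prefix_ (i+3) 0 - PySem.List.pyGetD prefix_ i 0|)) then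
    false
  else
    decide (|PySem.List.pyGetD sequence 0 0 + PySem.List.pyGetD sequence 1 0 + PySem.List.pyGetD sequence 2 0 + PySem.List.pyGetD sequence 3 0| < 10)

-- ===== PRECONDITION & SPEC =====
-- Pre_ excludes exactly the inputs on which A raises IndexError: sequences shorter
-- than 4 whose pair/triple scans find no violation, so the unconditional
-- sequence[0]+sequence[1]+sequence[2]+sequence[3] access is out of range.
def Pre_valid_sequence (sequence : List Int) : Prop :=
  4 ≤ sequence.length ∨
  (∃ i < sequence.length - 1, 10 ≤ |sequence.getD i 0 + sequence.getD (i+1) 0|) ∨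
  (∃ i < sequence.length - 2, 10 ≤ |sequence.getD i 0 + sequence.getD (i+1) 0 + sequence.getD (i+2) 0|)
instance (sequence : List Int) : Decidable (Pre_valid_sequence sequence) := by
  unfold Pre_valid_sequence; infer_instance

def pvWitness_valid_sequence : List Int := [1, 2, 3, -5]

def Spec_valid_sequence (sequence : List Int) (out : Bool) : Prop := out = valid_sequence_alt sequence
instance (sequence : List Int) (out : Bool) : Decidable (Spec_valid_sequence sequence out) := by unfold Spec_valid_sequence; infer_instance

-- ===== CLAIM (what is proved, stated in full; the proofs are below) =====
def Claim_equal_valid_sequence : Prop := ∀ (sequence : List Int), Dom_valid_sequence sequence → Pre_valid_sequence sequence → Spec_valid_sequence sequence (valid_sequence sequence)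

-- ===== LEMMAS AND PROOFS =====

theorem pv_any_congr {α : Type} (l : List α) (f g : α → Bool)
    (h : ∀ x ∈ l, f x = g x) : l.any f = l.any g := by
  induction l with
  | nil => rfl
  | cons a t ih =>
      simp only [List.any_cons, h a (by simp), ih (fun x hx => h x (by simp [hx]))]

theorem pv_abs_ten (x : Int) :
    (decide (10 ≤ x) || decide (x ≤ -10)) = decide (10 ≤ |x|) := by
  rw [← Bool.decide_or]
  apply decide_eq_decide.mpr
  rw [le_abs]
  omega

theorem pvPrefix_getElem? (s : List Int) (t : Int) (j : Nat) (hj : j < s.length) :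
    (pvPrefix t s)[j]? = some (t + (s.take (j+1)).sum) := by
  induction s generalizing t j with
  | nil => simp at hj
  | cons x xs ih =>
      cases j with
      | zero => simp [pvPrefix]
      | succ k =>
          simp only [pvPrefix, List.getElem?_cons_succ, List.take_succ_cons, List.sum_cons]
          rw [ih (t + x) k (by simpa using hj)]
          ring_nf

theorem pvP_getD (s : List Int) (j : Nat) (hj : j ≤ s.length) :
    (0 :: pvPrefix 0 s).getD j 0 = (s.take j).sum := by
  cases j with
  | zero => simp
  | succ k =>
      have hk : k < s.length := by omega
      simp only [List.getD, List.getElem?_cons_succ]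
      rw [pvPrefix_getElem? s 0 k hk]
      simp

theorem pv_window (s : List Int) (k m : Nat) (hm : k + m ≤ s.length) (i : Int) (hi : i = (k : Int)) :
    PySem.List.pyGetD (0 :: pvPrefix 0 s) (i + m) 0 - PySem.List.pyGetD (0 :: pvPrefix 0 s) i 0
      = (s.take (k + m)).sum - (s.take k).sum := by
  subst hi
  have h1 : (k : Int) + m = ((k + m : Nat) : Int) := by push_cast; ring
  rw [h1, PySem.List.pyGetD_natCast, PySem.List.pyGetD_natCast,
      pvP_getD s (k + m) hm, pvP_getD s k (by omega)]

theorem pv_take_diff2 (s : List Int) (k : Nat) (h : k + 2 ≤ s.length) :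
    (s.take (k + 2)).sum - (s.take k).sum = s.getD k 0 + s.getD (k+1) 0 := by
  have h1 : k < s.length := by omega
  have h2 : k + 1 < s.length := by omega
  have e1 := List.sum_take_succ s k h1
  have e2 := List.sum_take_succ s (k+1) h2
  rw [show k+1+1 = k+2 from rfl] at e2
  simp only [List.getD, List.getElem?_eq_getElem h1, List.getElem?_eq_getElem h2, Option.getD_some]
  omega

theorem pv_take_diff3 (s : List Int) (k : Nat) (h : k + 3 ≤ s.length) :
    (s.take (k + 3)).sum - (s.take k).sum = s.getD k 0 + s.getD (k+1) 0 + s.getD (k+2) 0 := by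
  have h1 : k < s.length := by omega
  have h2 : k + 1 < s.length := by omega
  have h3 : k + 2 < s.length := by omega
  have e1 := List.sum_take_succ s k h1
  have e2 := List.sum_take_succ s (k+1) h2
  have e3 := List.sum_take_succ s (k+2) h3
  rw [show k+1+1 = k+2 from rfl] at e2
  rw [show k+2+1 = k+3 from rfl] at e3
  simp only [List.getD, List.getElem?_eq_getElem h1, List.getElem?_eq_getElem h2,
    List.getElem?_eq_getElem h3, Option.getD_some]
  omega

theorem pv_getD_int (s : List Int) (k : Nat) :
    PySem.List.pyGetD s ((k : Int)) 0 = s.getD k 0 := PySem.List.pyGetD_natCast s k 0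

-- ===== VERDICT (by name: the statement is the Claim_ definition above) =====
theorem valid_sequence_spec : Claim_equal_valid_sequence := by
  intro s _ _
  unfold Spec_valid_sequence valid_sequence valid_sequence_alt
  simp only []
  have hpair :
      (PySem.List.pyRange 0 ((s.length : Int) - 1) 1).any (fun i =>
        decide (10 ≤ PySem.List.pyGetD s i 0 + PySem.List.pyGetD s (i+1) 0) ||
        decide (PySem.List.pyGetD s i 0 + PySem.List.pyGetD s (i+1) 0 ≤ -10)) =
      (PySem.List.pyRange 0 ((s.length : Int) - 1) 1).any (fun i =>
        decide (10 ≤ |PySem.List.pyGetD (0 :: pvPrefix 0 s) (i+2) 0 - PySem.List.pyGetD (0 :: pvPrefix 0 s) i 0|)) := by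
    apply pv_any_congr
    intro i hi
    rw [PySem.List.mem_pyRange_one] at hi
    obtain ⟨h0, h1⟩ := hi
    set k := i.toNat with hk
    have hik : i = (k : Int) := by omega
    have hkb : k + 2 ≤ s.length := by omega
    have hw := pv_window s k 2 hkb i hik
    norm_num at hw
    rw [hw, pv_take_diff2 s k hkb, pv_abs_ten]
    rw [hik, show ((k : Int) + 1) = ((k + 1 : Nat) : Int) by push_cast; ring,
        pv_getD_int, pv_getD_int]
  have htrip :
      (PySem.List.pyRange 0 ((s.length : Int) - 2) 1).any (fun i =>
        decide (10 ≤ PySem.List.pyGetD s i 0 + PySem.List.pyGetD s (i+1) 0 + PySem.List.pyGetD s (i+2) 0) ||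
        decide (PySem.List.pyGetD s i 0 + PySem.List.pyGetD s (i+1) 0 + PySem.List.pyGetD s (i+2) 0 ≤ -10)) =
      (PySem.List.pyRange 0 ((s.length : Int) - 2) 1).any (fun i =>
        decide (10 ≤ |PySem.List.pyGetD (0 :: pvPrefix 0 s) (i+3) 0 - PySem.List.pyGetD (0 :: pvPrefix 0 s) i 0|)) := by
    apply pv_any_congr
    intro i hi
    rw [PySem.List.mem_pyRange_one] at hi
    obtain ⟨h0, h1⟩ := hi
    set k := i.toNat with hk
    have hik : i = (k : Int) := by omega
    have hkb : k + 3 ≤ s.length := by omega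
    have hw := pv_window s k 3 hkb i hik
    norm_num at hw
    rw [hw, pv_take_diff3 s k hkb, pv_abs_ten]
    rw [hik, show ((k : Int) + 1) = ((k + 1 : Nat) : Int) by push_cast; ring,
        show ((k : Int) + 2) = ((k + 2 : Nat) : Int) by push_cast; ring,
        pv_getD_int, pv_getD_int, pv_getD_int]
  rw [hpair, htrip]
  set q := PySem.List.pyGetD s 0 0 + PySem.List.pyGetD s 1 0 + PySem.List.pyGetD s 2 0 + PySem.List.pyGetD s 3 0 with hq
  have hfin : (if (decide (10 ≤ q) || decide (q ≤ -10)) = true then false else true) = decide (|q| < 10) := by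
    rw [pv_abs_ten]
    by_cases h : 10 ≤ |q| <;> simp [h] <;> omega
  split_ifs with c1 c2 <;> simp_all <;>
    first
      | (rw [le_abs]; omega)
      | (rw [abs_lt]; omega)
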